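-- pv_equiv track=rewrite | github.com/Sri-Lekha03/data-pipeline | build/package/pipeline/handler.py | group_by_partition
-- ===== SOURCE A (Python) =====
-- from typing import Any
--
-- def group_by_partition(
--     records: list[dict[str, Any]],
-- ) -> dict[str, list[dict[str, Any]]]:
--     """Group transformed records by their partition path."""
--     groups: dict[str, list[dict[str, Any]]] = {}
--     for record in records:
--         partition = record.pop("_partition", "unknown/")
--         groups.setdefault(partition, []).append(record)
--     return groups
-- ===== SOURCE B (Python) =====
-- def group_by_partition(records):
--     """Group transformed records by their partition path."""
--     pairs = [(record.pop("_partition", "unknown/"), record) for record in records]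
--     keys = list(dict.fromkeys(k for k, _ in pairs))
--     return {k: [r for kk, r in pairs if kk == k] for k in keys}
-- ===== Notes on version B (the rewrite author's own statement) =====
-- stated objective: alternative
-- what changed: Replaces the single-pass setdefault/append hash bucketing with a two-phase decomposition: extract (partition, record) pairs, dedup the keys in first-occurrence order, then build the result as a per-key filter comprehension.
import Mathlib
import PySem

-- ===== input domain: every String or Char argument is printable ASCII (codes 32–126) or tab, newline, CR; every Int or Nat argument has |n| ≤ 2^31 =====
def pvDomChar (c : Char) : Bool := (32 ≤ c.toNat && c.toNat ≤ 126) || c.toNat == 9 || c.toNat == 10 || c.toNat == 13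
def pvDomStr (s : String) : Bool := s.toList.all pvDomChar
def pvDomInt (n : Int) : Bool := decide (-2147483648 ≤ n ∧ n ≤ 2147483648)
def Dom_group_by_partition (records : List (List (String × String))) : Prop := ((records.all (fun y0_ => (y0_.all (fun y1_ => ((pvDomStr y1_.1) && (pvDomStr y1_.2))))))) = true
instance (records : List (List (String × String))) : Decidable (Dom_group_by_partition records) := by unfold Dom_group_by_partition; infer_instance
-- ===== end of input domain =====

-- B replaces A's single-pass setdefault/append bucketing by pair extraction + key dedup + per-key filtering
-- (objective: alternative decomposition, same results). Both Pythons pop '_partition' out of each record in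
-- place; the equivalence proved here is about the RETURN value (B performs the same mutation).


-- shared helper: record.pop("_partition", "unknown/") — returns the value (first match, default "unknown/")
-- and the record with that key removed; both Pythons perform exactly this pop
def popPartition (record : List (String × String)) : String × List (String × String) :=
  let d := PySem.Dict.mk record
  ((d.get? "_partition").getD "unknown/", (d.erase "_partition").items)

-- ===== PORT A =====
def group_by_partition (records : List (List (String × String))) : List (String × List (List (String × String))) :=
  -- groups = {}; for record in records: partition = record.pop(...); groups.setdefault(partition, []).append(record)
  (records.foldl
    (fun (groups : PySem.Dict String (List (List (String × String)))) record =>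
      let p := popPartition record
      groups.modify p.1 [] (· ++ [p.2]))
    PySem.Dict.empty).items

-- ===== PORT B =====
def group_by_partition_alt (records : List (List (String × String))) : List (String × List (List (String × String))) :=
  let pairs := records.map popPartition
  let keys := PySem.List.dedup (pairs.map (·.1))
  keys.map (fun k => (k, (pairs.filter (fun p => p.1 == k)).map (·.2)))

-- ===== PRECONDITION & SPEC =====
def Spec_group_by_partition (records : List (List (String × String))) (out : List (String × List (List (String × String)))) : Prop := out = group_by_partition_alt records
instance (records : List (List (String × String))) (out : List (String × List (List (String × String)))) : Decidable (Spec_group_by_partition records out) := by unfold Spec_group_by_partition; infer_instance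

-- ===== CLAIM (what is proved, stated in full; the proofs are below) =====
def Claim_equal_group_by_partition : Prop := ∀ (records : List (List (String × String))), Dom_group_by_partition records → Spec_group_by_partition records (group_by_partition records)

-- ===== LEMMAS AND PROOFS =====

theorem group_items (pairs : List (String × List (String × String))) :
    (pairs.foldl
      (fun (d : PySem.Dict String (List (List (String × String)))) p =>
        d.modify p.1 [] (· ++ [p.2])) PySem.Dict.empty).items
    = (PySem.List.dedup (pairs.map (·.1))).map
        (fun k => (k, (pairs.filter (fun p => p.1 == k)).map (·.2))) := by
  have hnd : ((pairs.foldl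
      (fun (d : PySem.Dict String (List (List (String × String)))) p =>
        d.modify p.1 [] (· ++ [p.2])) PySem.Dict.empty)).keys.Nodup :=
    PySem.Dict.nodup_keys_foldl_modify_key pairs (·.1) [] (fun _ p => (· ++ [p.2]))
      PySem.Dict.empty (by simp [PySem.Dict.keys_empty])
  rw [PySem.Dict.items_eq_map_keys _ hnd []]
  rw [PySem.Dict.keys_foldl_modify_key]
  simp only [PySem.Dict.keys_empty, PySem.Set.update_nil_left, PySem.List.dedup_eq_ofList]
  refine List.map_congr_left (fun k hk => ?_)
  congr 1
  rw [PySem.Dict.getD_foldl_modify_append]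
  simp [PySem.Dict.getD_empty]

theorem group_by_partition_eq_alt (records : List (List (String × String))) :
    group_by_partition records = group_by_partition_alt records := by
  unfold group_by_partition group_by_partition_alt
  have h := group_items (records.map popPartition)
  rw [List.foldl_map] at h
  exact h

-- ===== VERDICT (by name: the statement is the Claim_ definition above) =====
theorem group_by_partition_spec : Claim_equal_group_by_partition := by
  intro records _
  exact group_by_partition_eq_alt records
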